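-- pv_equiv track=rewrite | github.com/kinetixnetworks/infrahub-emma | pages/schema_builder.py | merge_overviews
-- ===== SOURCE A (Python) =====
-- from typing import Any
--
-- def merge_overviews(overview_list: list[dict[str, Any]]) -> dict[str, Any]:
--     """Merge multiple schema overviews into one."""
--     merged: dict[str, Any] = {}
--     for overview in overview_list:
--         for namespace, nodes in overview.items():
--             if namespace not in merged:
--                 merged[namespace] = {}
--             for node_name, attrs in nodes.items():
--                 if node_name not in merged[namespace]:
--                     merged[namespace][node_name] = {}
--                 merged[namespace][node_name].update(attrs)
--     return merged
-- ===== SOURCE B (Python) =====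
-- def merge_overviews(overview_list):
--     """Merge multiple schema overviews into one.
--
--     Declarative characterisation instead of incremental merging: key order at
--     every level is first-occurrence order across all overviews (dict.fromkeys),
--     and each attribute's value is its last occurrence (shallow, last wins).
--     """
--
--     def last_value(ns, node, key):
--         occurrences = [
--             ov[ns][node][key]
--             for ov in overview_list
--             if key in ov.get(ns, {}).get(node, {})
--         ]
--         return occurrences[-1]
--
--     def node_attrs(ns, node):
--         keys = dict.fromkeys(
--             k for ov in overview_list for k in ov.get(ns, {}).get(node, {})
--         )
--         return {k: last_value(ns, node, k) for k in keys}
--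
--     def ns_nodes(ns):
--         nodes = dict.fromkeys(
--             n for ov in overview_list for n in ov.get(ns, {})
--         )
--         return {n: node_attrs(ns, n) for n in nodes}
--
--     namespaces = dict.fromkeys(ns for ov in overview_list for ns in ov)
--     return {ns: ns_nodes(ns) for ns in namespaces}
-- ===== Notes on version B (the rewrite author's own statement) =====
-- stated objective: alternative
-- what changed: Replaces A's single imperative triple-nested loop that incrementally mutates one nested accumulator dict with a declarative characterisation of the result: key order at every level is first-occurrence order collected with dict.fromkeys, and each attribute value is computed independently as its last occurrence across the overviews.
import Mathlib
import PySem

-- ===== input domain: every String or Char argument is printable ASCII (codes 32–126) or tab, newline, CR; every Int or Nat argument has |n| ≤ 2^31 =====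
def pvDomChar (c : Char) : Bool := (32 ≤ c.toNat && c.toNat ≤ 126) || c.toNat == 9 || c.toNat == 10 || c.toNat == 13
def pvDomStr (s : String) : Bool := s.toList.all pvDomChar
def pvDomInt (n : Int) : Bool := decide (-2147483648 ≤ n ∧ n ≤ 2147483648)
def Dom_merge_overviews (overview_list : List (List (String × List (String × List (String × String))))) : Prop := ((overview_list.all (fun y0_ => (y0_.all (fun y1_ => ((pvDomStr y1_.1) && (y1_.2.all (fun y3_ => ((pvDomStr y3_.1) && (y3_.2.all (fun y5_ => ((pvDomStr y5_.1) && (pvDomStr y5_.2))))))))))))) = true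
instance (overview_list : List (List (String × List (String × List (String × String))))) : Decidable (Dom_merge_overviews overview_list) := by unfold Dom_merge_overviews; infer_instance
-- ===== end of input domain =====

-- B replaces A's imperative triple-nested merge into one mutated accumulator by a
-- declarative characterisation (first-occurrence key order via dict.fromkeys, last
-- occurrence wins for each attribute value); objective: alternative algorithm.

-- ===== PORT A =====
-- merged is the nested-dict state; the final .items maps the state back to the
-- association-list return type (a Python dict of dicts IS that nested list here).
def merge_overviews (overview_list : List (List (String × List (String × List (String × String))))) : List (String × List (String × List (String × String))) :=
  let merged : PySem.Dict String (PySem.Dict String (PySem.Dict String String)) :=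
    overview_list.foldl (fun merged overview =>
      overview.foldl (fun merged p =>
        -- if namespace not in merged: merged[namespace] = {}
        let merged := if merged.contains p.1 then merged else merged.insert p.1 PySem.Dict.empty
        p.2.foldl (fun merged q =>
          let inner := merged.getD p.1 PySem.Dict.empty
          -- if node_name not in merged[namespace]: merged[namespace][node_name] = {}
          let inner := if inner.contains q.1 then inner else inner.insert q.1 PySem.Dict.empty
          -- merged[namespace][node_name].update(attrs)
          let inner := inner.insert q.1 ((inner.getD q.1 PySem.Dict.empty).update q.2)
          merged.insert p.1 inner) merged) merged) PySem.Dict.empty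
  merged.items.map (fun p => (p.1, p.2.items.map (fun q => (q.1, q.2.items))))

-- ===== PORT B =====
-- d.get(k, default) on a Python dict = first-match lookup in the association list
def bLookup {a : Type} (l : List (String × a)) (k : String) : Option a :=
  (l.find? (fun p => p.1 == k)).map (fun p => p.2)

-- ov.get(ns, {})
def bGetNs (ov : List (String × List (String × List (String × String)))) (ns : String) : List (String × List (String × String)) :=
  (bLookup ov ns).getD []

-- ov.get(ns, {}).get(node, {})
def bGetNode (ov : List (String × List (String × List (String × String)))) (ns node : String) : List (String × String) :=
  (bLookup (bGetNs ov ns) node).getD []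

-- last_value: the guarded comprehension ('key in d' then 'd[key]') is the filterMap
-- of the lookup, and occurrences[-1] on the (always nonempty) result is getLastD
def bLastValue (ol : List (List (String × List (String × List (String × String))))) (ns node key : String) : String :=
  (ol.filterMap (fun ov => bLookup (bGetNode ov ns node) key)).getLastD ""

-- node_attrs: dict.fromkeys of all occurrences of attr keys, then their last values
def bNodeAttrs (ol : List (List (String × List (String × List (String × String))))) (ns node : String) : List (String × String) :=
  (PySem.List.dedup (ol.flatMap (fun ov => (bGetNode ov ns node).map (fun q => q.1)))).map
    (fun k => (k, bLastValue ol ns node k))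

-- ns_nodes: dict.fromkeys of all node names seen under ns
def bNsNodes (ol : List (List (String × List (String × List (String × String))))) (ns : String) : List (String × List (String × String)) :=
  (PySem.List.dedup (ol.flatMap (fun ov => (bGetNs ov ns).map (fun q => q.1)))).map
    (fun n => (n, bNodeAttrs ol ns n))

def merge_overviews_alt (overview_list : List (List (String × List (String × List (String × String))))) : List (String × List (String × List (String × String))) :=
  (PySem.List.dedup (overview_list.flatMap (fun ov => ov.map (fun p => p.1)))).map
    (fun ns => (ns, bNsNodes overview_list ns))

-- ===== PRECONDITION & SPEC =====
-- The association lists encode Python dicts, whose keys are necessarily distinct: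
-- Pre_ requires Nodup keys at each of the three dict levels, so it excludes no
-- input the Python function can ever receive.
def Pre_merge_overviews (overview_list : List (List (String × List (String × List (String × String))))) : Prop :=
  ∀ ov ∈ overview_list, (ov.map (fun p => p.1)).Nodup ∧
    ∀ p ∈ ov, (p.2.map (fun q => q.1)).Nodup ∧
      ∀ q ∈ p.2, (q.2.map (fun r => r.1)).Nodup
instance (overview_list : List (List (String × List (String × List (String × String))))) : Decidable (Pre_merge_overviews overview_list) := by unfold Pre_merge_overviews; infer_instance

def pvWitness_merge_overviews : (List (List (String × List (String × List (String × String))))) :=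
  [[("core", [("Device", [("name", "Text")])])], [("core", [("Device", [("name", "String"), ("role", "Text")]), ("Site", [])])]]

def Spec_merge_overviews (overview_list : List (List (String × List (String × List (String × String))))) (out : List (String × List (String × List (String × String)))) : Prop := out = merge_overviews_alt overview_list
instance (overview_list : List (List (String × List (String × List (String × String))))) (out : List (String × List (String × List (String × String)))) : Decidable (Spec_merge_overviews overview_list out) := by unfold Spec_merge_overviews; infer_instance

-- ===== CLAIM (what is proved, stated in full; the proofs are below) =====
def Claim_equal_merge_overviews : Prop := ∀ (overview_list : List (List (String × List (String × List (String × String))))), Dom_merge_overviews overview_list → Pre_merge_overviews overview_list → Spec_merge_overviews overview_list (merge_overviews overview_list)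

-- ===== LEMMAS AND PROOFS =====

-- expanded-form names for the loop bodies of A's port (definitionally equal to them)
def aNodeStep (ns : String) (merged : PySem.Dict String (PySem.Dict String (PySem.Dict String String)))
    (q : String × List (String × String)) : PySem.Dict String (PySem.Dict String (PySem.Dict String String)) :=
  let i := merged.getD ns PySem.Dict.empty
  let i := if i.contains q.1 then i else i.insert q.1 PySem.Dict.empty
  merged.insert ns (i.insert q.1 ((i.getD q.1 PySem.Dict.empty).update q.2))

def aNsStep (merged : PySem.Dict String (PySem.Dict String (PySem.Dict String String)))
    (p : String × List (String × List (String × String))) :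
    PySem.Dict String (PySem.Dict String (PySem.Dict String String)) :=
  p.2.foldl (aNodeStep p.1) (if merged.contains p.1 then merged else merged.insert p.1 PySem.Dict.empty)

-- ensure-free forms of A's two step functions
def mNodeStep (i : PySem.Dict String (PySem.Dict String String)) (q : String × List (String × String)) :
    PySem.Dict String (PySem.Dict String String) :=
  i.insert q.1 ((i.getD q.1 PySem.Dict.empty).update q.2)

def mNsStep (m : PySem.Dict String (PySem.Dict String (PySem.Dict String String)))
    (p : String × List (String × List (String × String))) :
    PySem.Dict String (PySem.Dict String (PySem.Dict String String)) :=
  m.insert p.1 (p.2.foldl mNodeStep (m.getD p.1 PySem.Dict.empty))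

-- inserting the value a key already maps to is the identity (on Nodup-keyed dicts)
theorem dict_insert_of_get?_self {k : Type} {n : Type} [BEq k] [LawfulBEq k]
    (d : PySem.Dict k n) (key : k) (v : n) (h : d.get? key = some v) (hnd : d.keys.Nodup) :
    d.insert key v = d := by
  apply PySem.Dict.ext
  rw [PySem.Dict.items_insert_of_contains _ _
    (by rw [PySem.Dict.contains_eq_isSome_get?, h]; rfl)]
  have hmap : ∀ p ∈ d.items, (if p.1 == key then (key, v) else p) = p := by
    intro p hp
    obtain ⟨p1, p2⟩ := p
    by_cases hk : p1 == key
    · have hk' : p1 = key := eq_of_beq hk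
      subst hk'
      have := PySem.Dict.get?_of_mem_items d hp hnd
      rw [h] at this
      injection this with h2
      simp [h2]
    · simp [hk]
  rw [List.map_congr_left hmap]
  simp

-- A's innermost ensure-then-update collapses to the ensure-free node step
theorem step0 (inner : PySem.Dict String (PySem.Dict String String)) (q : String × List (String × String)) :
    (if inner.contains q.1 then inner else inner.insert q.1 PySem.Dict.empty).insert q.1
      (((if inner.contains q.1 then inner else inner.insert q.1 PySem.Dict.empty).getD q.1
          PySem.Dict.empty).update q.2)
    = mNodeStep inner q := by
  by_cases hc : inner.contains q.1 = true
  · rw [if_pos hc]; rfl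
  · rw [if_neg hc, PySem.Dict.getD_insert_self, PySem.Dict.insert_insert_self, mNodeStep,
      PySem.Dict.getD_of_not_contains _ _ (Bool.not_eq_true _ ▸ hc)]

-- A's node loop, started on a state where ns was just written, writes back the node-level fold
theorem node_loop_eq (nodes : List (String × List (String × String)))
    (merged : PySem.Dict String (PySem.Dict String (PySem.Dict String String)))
    (ns : String) (inner : PySem.Dict String (PySem.Dict String String)) :
    nodes.foldl (aNodeStep ns) (merged.insert ns inner)
      = merged.insert ns (nodes.foldl mNodeStep inner) := by
  induction nodes generalizing inner with
  | nil => rfl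
  | cons q rest ih =>
    have h1 : aNodeStep ns (merged.insert ns inner) q = merged.insert ns (mNodeStep inner q) := by
      simp only [aNodeStep, PySem.Dict.getD_insert_self, PySem.Dict.insert_insert_self]
      rw [step0]
    rw [List.foldl_cons, h1, ih, List.foldl_cons]

-- A's per-namespace step equals the ensure-free one (on Nodup-keyed states)
theorem nsStep_eq (merged : PySem.Dict String (PySem.Dict String (PySem.Dict String String)))
    (p : String × List (String × List (String × String))) (hnd : merged.keys.Nodup) :
    aNsStep merged p = mNsStep merged p := by
  unfold aNsStep mNsStep
  by_cases hc : merged.contains p.1 = true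
  · rw [if_pos hc]
    have hsome : (merged.get? p.1).isSome := by
      rw [← PySem.Dict.contains_eq_isSome_get?, hc]
    obtain ⟨inner, hinner⟩ := Option.isSome_iff_exists.mp hsome
    have hid := dict_insert_of_get?_self merged p.1 inner hinner hnd
    rw [← hid, PySem.Dict.insert_insert_self, PySem.Dict.getD_insert_self]
    exact node_loop_eq p.2 merged p.1 inner
  · rw [if_neg hc, PySem.Dict.getD_of_not_contains _ _ (Bool.not_eq_true _ ▸ hc)]
    exact node_loop_eq p.2 merged p.1 PySem.Dict.empty

-- Nodup keys survive any mNsStep loop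
theorem nodup_foldl_mNsStep (l : List (String × List (String × List (String × String))))
    (m : PySem.Dict String (PySem.Dict String (PySem.Dict String String)))
    (hm : m.keys.Nodup) : (l.foldl mNsStep m).keys.Nodup := by
  induction l generalizing m with
  | nil => exact hm
  | cons p rest ih => exact ih _ (PySem.Dict.nodup_keys_insert _ _ _ hm)

-- A's whole loop nest = a single fold of the ensure-free step over the concatenated pairs
theorem a_fold_eq (ol : List (List (String × List (String × List (String × String)))))
    (merged : PySem.Dict String (PySem.Dict String (PySem.Dict String String)))
    (hnd : merged.keys.Nodup) :
    ol.foldl (fun m ov => ov.foldl aNsStep m) merged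
      = (ol.flatMap id).foldl mNsStep merged := by
  induction ol generalizing merged with
  | nil => rfl
  | cons ov rest ih =>
    have hov : ∀ m : PySem.Dict String (PySem.Dict String (PySem.Dict String String)),
        m.keys.Nodup → ov.foldl aNsStep m = ov.foldl mNsStep m := by
      intro m hm
      induction ov generalizing m with
      | nil => rfl
      | cons p prest ihp =>
        rw [List.foldl_cons, nsStep_eq m p hm, List.foldl_cons]
        exact ihp _ (PySem.Dict.nodup_keys_insert _ _ _ hm)
    rw [List.foldl_cons, hov merged hnd, List.flatMap_cons, List.foldl_append, id]
    exact ih _ (nodup_foldl_mNsStep ov merged hnd)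

-- getD after a fold of read-modify-write inserts: only the pairs at that key matter
theorem getD_foldl_insertWith {b g : Type} (gf : b → g → b) (dflt : b)
    (l : List (String × g)) (d : PySem.Dict String b) (x : String) :
    (l.foldl (fun d p => d.insert p.1 (gf (d.getD p.1 dflt) p.2)) d).getD x dflt
      = (l.filter (fun p => p.1 == x)).foldl (fun v p => gf v p.2) (d.getD x dflt) := by
  induction l generalizing d with
  | nil => rfl
  | cons p rest ih =>
    rw [List.foldl_cons, ih, List.filter_cons]
    by_cases hx : p.1 = x
    · subst hx
      simp [PySem.Dict.getD_insert_self]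
    · have : (p.1 == x) = false := beq_eq_false_iff_ne.mpr hx
      simp only [this, Bool.false_eq_true, if_false]
      rw [PySem.Dict.getD_insert_of_ne _ _ _ (fun h => hx h.symm)]

-- getD of a dict.update: the last matching value, else the old binding
theorem getD_update_char (d : PySem.Dict String String) (kvs : List (String × String)) (k : String) :
    (d.update kvs).getD k "" = ((kvs.filter (fun p => p.1 == k)).map (fun p => p.2)).getLastD (d.getD k "") := by
  induction kvs generalizing d with
  | nil => rfl
  | cons p rest ih =>
    show ((d.insert p.1 p.2).update rest).getD k "" = _
    rw [ih, List.filter_cons]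
    by_cases hx : p.1 = k
    · subst hx
      rw [if_pos (by simp), List.map_cons, List.getLastD_cons, PySem.Dict.getD_insert_self]
    · have : (p.1 == k) = false := beq_eq_false_iff_ne.mpr hx
      simp only [this, Bool.false_eq_true, if_false]
      rw [PySem.Dict.getD_insert_of_ne _ _ _ (fun h => hx h.symm)]

-- on a Nodup association list, filtering at a key is the (at most one) first match
theorem filter_eq_of_nodup {a : Type} (l : List (String × a)) (x : String)
    (h : (l.map (fun p => p.1)).Nodup) :
    l.filter (fun p => p.1 == x) = ((bLookup l x).map (fun v => (x, v))).toList := by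
  induction l with
  | nil => rfl
  | cons p rest ih =>
    rw [List.map_cons, List.nodup_cons] at h
    obtain ⟨hp, hrest⟩ := h
    rw [List.filter_cons]
    by_cases hx : p.1 = x
    · subst hx
      have hnil : rest.filter (fun q => q.1 == p.1) = [] := by
        apply List.filter_eq_nil_iff.mpr
        intro q hq hq1
        exact hp (List.mem_map.mpr ⟨q, hq, (eq_of_beq hq1)⟩)
      simp [bLookup, hnil]
    · have hb : (p.1 == x) = false := beq_eq_false_iff_ne.mpr hx
      simp only [hb, Bool.false_eq_true, if_false]
      rw [ih hrest]
      simp [bLookup, hb]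

-- flatMap of the matched nodes = the dict .get on a Nodup association list
theorem filter_flatMap_eq_bGet {a : Type} (l : List (String × List a)) (x : String)
    (h : (l.map (fun p => p.1)).Nodup) :
    (l.filter (fun p => p.1 == x)).flatMap (fun p => p.2) = (bLookup l x).getD [] := by
  rw [filter_eq_of_nodup l x h]
  cases bLookup l x with
  | none => rfl
  | some v => simp

-- map snd of the matched values = the Option of the lookup, as a list
theorem filter_map_eq_toList {a : Type} (l : List (String × a)) (x : String)
    (h : (l.map (fun p => p.1)).Nodup) :
    (l.filter (fun p => p.1 == x)).map (fun p => p.2) = (bLookup l x).toList := by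
  rw [filter_eq_of_nodup l x h]
  cases bLookup l x with
  | none => rfl
  | some v => simp

-- flatMap of Option.toList is filterMap
theorem flatMap_toList_eq_filterMap {a b : Type} (f : a → Option b) (l : List a) :
    l.flatMap (fun x => (f x).toList) = l.filterMap f := by
  induction l with
  | nil => rfl
  | cons x rest ih =>
    rw [List.flatMap_cons, List.filterMap_cons, ih]
    cases f x with
    | none => rfl
    | some v => rfl


-- filter distributes over concatenation
theorem filter_flatMap_id {a : Type} (l : List (List a)) (P : a → Bool) :
    (l.flatMap id).filter P = l.flatMap (fun x => x.filter P) := by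
  induction l with
  | nil => rfl
  | cons x rest ih => rw [List.flatMap_cons, List.filter_append, ih, List.flatMap_cons]; rfl

-- a fold of per-group folds over the .2 components is one fold over their concatenation
theorem foldl_snd_flatMap {a b g : Type} (f : b → g → b) (l : List (a × List g)) (init : b) :
    l.foldl (fun v p => p.2.foldl f v) init = (l.flatMap (fun p => p.2)).foldl f init := by
  induction l generalizing init with
  | nil => rfl
  | cons p rest ih => rw [List.foldl_cons, List.flatMap_cons, List.foldl_append, ih]

-- keys of the namespace-level fold: first occurrences of the namespaces
theorem M_keys (l : List (String × List (String × List (String × String)))) :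
    (l.foldl mNsStep PySem.Dict.empty).keys = PySem.Set.ofList (l.map (fun p => p.1)) := by
  have h := PySem.Dict.keys_foldl_insert_key l (fun p => p.1)
    (fun d p => p.2.foldl mNodeStep (d.getD p.1 PySem.Dict.empty)) PySem.Dict.empty
  rw [PySem.Dict.keys_empty] at h
  exact h

-- lookup in the namespace-level fold: the fold over just that namespace's pairs
theorem M_getD (l : List (String × List (String × List (String × String)))) (ns : String) :
    (l.foldl mNsStep PySem.Dict.empty).getD ns PySem.Dict.empty
      = ((l.filter (fun p => p.1 == ns)).flatMap (fun p => p.2)).foldl mNodeStep PySem.Dict.empty := by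
  have h := getD_foldl_insertWith (fun b c => c.foldl mNodeStep b) PySem.Dict.empty l PySem.Dict.empty ns
  rw [PySem.Dict.getD_empty] at h
  exact h.trans (foldl_snd_flatMap mNodeStep _ _)

-- keys of the node-level fold
theorem N_keys (qs : List (String × List (String × String))) :
    (qs.foldl mNodeStep PySem.Dict.empty).keys = PySem.Set.ofList (qs.map (fun p => p.1)) := by
  have h := PySem.Dict.keys_foldl_insert_key qs (fun p => p.1)
    (fun d p => (d.getD p.1 PySem.Dict.empty).update p.2) PySem.Dict.empty
  rw [PySem.Dict.keys_empty] at h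
  exact h

-- lookup in the node-level fold: one dict.update over that node's attrs
theorem N_getD (qs : List (String × List (String × String))) (node : String) :
    (qs.foldl mNodeStep PySem.Dict.empty).getD node PySem.Dict.empty
      = PySem.Dict.empty.update ((qs.filter (fun p => p.1 == node)).flatMap (fun p => p.2)) := by
  have h := getD_foldl_insertWith (fun b c => PySem.Dict.update b c) PySem.Dict.empty qs PySem.Dict.empty node
  rw [PySem.Dict.getD_empty] at h
  exact h.trans (foldl_snd_flatMap (fun (acc : PySem.Dict String String) (q : String × String) => acc.insert q.1 q.2) _ _)

-- keys of a dict.update from empty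
theorem keys_update_empty (rs : List (String × String)) :
    (PySem.Dict.empty.update rs).keys = PySem.Set.ofList (rs.map (fun p => p.1)) := by
  have h := PySem.Dict.keys_foldl_insert_key rs (fun p => p.1) (fun _ p => p.2) PySem.Dict.empty
  rw [PySem.Dict.keys_empty] at h
  exact h

-- Pre_ gives Nodup keys for the looked-up node maps
theorem pre_nodes (ol : List (List (String × List (String × List (String × String)))))
    (hpre : Pre_merge_overviews ol) (ov : List (String × List (String × List (String × String))))
    (hov : ov ∈ ol) (ns : String) : ((bGetNs ov ns).map (fun p => p.1)).Nodup := by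
  unfold bGetNs bLookup
  cases hfind : ov.find? (fun p => p.1 == ns) with
  | none => simp
  | some p =>
    simp only [Option.map_some, Option.getD_some]
    exact ((hpre ov hov).2 p (List.mem_of_find?_eq_some hfind)).1

-- Pre_ gives Nodup keys for the looked-up attr maps
theorem pre_attrs (ol : List (List (String × List (String × List (String × String)))))
    (hpre : Pre_merge_overviews ol) (ov : List (String × List (String × List (String × String))))
    (hov : ov ∈ ol) (ns node : String) : ((bGetNode ov ns node).map (fun p => p.1)).Nodup := by
  unfold bGetNode bLookup
  cases hfind : (bGetNs ov ns).find? (fun p => p.1 == node) with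
  | none => simp
  | some q =>
    simp only [Option.map_some, Option.getD_some]
    have hq : q ∈ bGetNs ov ns := List.mem_of_find?_eq_some hfind
    unfold bGetNs bLookup at hq
    cases hfind2 : ov.find? (fun p => p.1 == ns) with
    | none => rw [hfind2] at hq; simp at hq
    | some p =>
      rw [hfind2] at hq
      simp only [Option.map_some, Option.getD_some] at hq
      exact ((hpre ov hov).2 p (List.mem_of_find?_eq_some hfind2)).2 q hq

-- the namespace slice of the concatenated pairs = per-overview .get(ns, {})
theorem dist_ns (ol : List (List (String × List (String × List (String × String)))))
    (hpre : Pre_merge_overviews ol) (ns : String) :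
    ((ol.flatMap id).filter (fun p => p.1 == ns)).flatMap (fun p => p.2)
      = ol.flatMap (fun ov => bGetNs ov ns) := by
  rw [filter_flatMap_id, List.flatMap_assoc]
  exact List.flatMap_congr (fun ov hov =>
    filter_flatMap_eq_bGet ov ns (hpre ov hov).1)

-- the node slice of the namespace slice = per-overview .get(ns, {}).get(node, {})
theorem dist_node (ol : List (List (String × List (String × List (String × String)))))
    (hpre : Pre_merge_overviews ol) (ns node : String) :
    ((ol.flatMap (fun ov => bGetNs ov ns)).filter (fun q => q.1 == node)).flatMap (fun q => q.2)
      = ol.flatMap (fun ov => bGetNode ov ns node) := by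
  rw [show (ol.flatMap (fun ov => bGetNs ov ns)).filter (fun q => q.1 == node)
        = ol.flatMap (fun ov => (bGetNs ov ns).filter (fun q => q.1 == node)) from by
      rw [show ol.flatMap (fun ov => bGetNs ov ns) = (ol.map (fun ov => bGetNs ov ns)).flatMap id from by
          rw [List.flatMap_map]; rfl]
      rw [filter_flatMap_id, List.flatMap_map]]
  rw [List.flatMap_assoc]
  exact List.flatMap_congr (fun ov hov =>
    filter_flatMap_eq_bGet (bGetNs ov ns) node (pre_nodes ol hpre ov hov ns))

-- the matched attr values of the node slice = the filterMap of B's last_value scan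
theorem dist_attr (ol : List (List (String × List (String × List (String × String)))))
    (hpre : Pre_merge_overviews ol) (ns node k : String) :
    (((ol.flatMap (fun ov => bGetNode ov ns node)).filter (fun r => r.1 == k)).map (fun r => r.2))
      = ol.filterMap (fun ov => bLookup (bGetNode ov ns node) k) := by
  rw [show (ol.flatMap (fun ov => bGetNode ov ns node)).filter (fun r => r.1 == k)
        = ol.flatMap (fun ov => (bGetNode ov ns node).filter (fun r => r.1 == k)) from by
      rw [show ol.flatMap (fun ov => bGetNode ov ns node) = (ol.map (fun ov => bGetNode ov ns node)).flatMap id from by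
          rw [List.flatMap_map]; rfl]
      rw [filter_flatMap_id, List.flatMap_map]]
  rw [List.map_flatMap]
  rw [List.flatMap_congr (fun ov hov =>
    filter_map_eq_toList (bGetNode ov ns node) k (pre_attrs ol hpre ov hov ns node))]
  exact flatMap_toList_eq_filterMap _ ol

-- the attr-level dict of A agrees item-for-item with B's node_attrs
theorem attrs_items_eq (ol : List (List (String × List (String × List (String × String)))))
    (hpre : Pre_merge_overviews ol) (ns node : String) :
    (PySem.Dict.empty.update (ol.flatMap (fun ov => bGetNode ov ns node))).items
      = bNodeAttrs ol ns node := by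
  set RS := ol.flatMap (fun ov => bGetNode ov ns node) with hRS
  have hnd : (PySem.Dict.empty.update RS).keys.Nodup := by
    rw [keys_update_empty]; exact PySem.Set.nodup_ofList _
  rw [PySem.Dict.items_eq_map_keys _ hnd "", keys_update_empty]
  unfold bNodeAttrs
  have hk : PySem.Set.ofList (RS.map (fun p => p.1))
      = PySem.List.dedup (ol.flatMap (fun ov => (bGetNode ov ns node).map (fun q => q.1))) := by
    rw [hRS, List.map_flatMap]; rfl
  rw [hk]
  apply List.map_congr_left
  intro k _
  have hv : (PySem.Dict.empty.update RS).getD k "" = bLastValue ol ns node k := by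
    rw [getD_update_char, PySem.Dict.getD_empty, hRS, dist_attr ol hpre ns node k]
    rfl
  rw [hv]

-- the node-level dict of A agrees with B's ns_nodes
theorem nodes_items_eq (ol : List (List (String × List (String × List (String × String)))))
    (hpre : Pre_merge_overviews ol) (ns : String) :
    (((ol.flatMap (fun ov => bGetNs ov ns)).foldl mNodeStep PySem.Dict.empty).items.map
        (fun q => (q.1, q.2.items)))
      = bNsNodes ol ns := by
  set QS := ol.flatMap (fun ov => bGetNs ov ns) with hQS
  set N := QS.foldl mNodeStep PySem.Dict.empty with hN
  have hnd : N.keys.Nodup := by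
    rw [hN, N_keys]; exact PySem.Set.nodup_ofList _
  rw [PySem.Dict.items_eq_map_keys N hnd PySem.Dict.empty, List.map_map]
  unfold bNsNodes
  have hk : N.keys = PySem.List.dedup (ol.flatMap (fun ov => (bGetNs ov ns).map (fun q => q.1))) := by
    rw [hN, N_keys, hQS, List.map_flatMap]; rfl
  rw [hk]
  apply List.map_congr_left
  intro node _
  show (node, (N.getD node PySem.Dict.empty).items) = (node, bNodeAttrs ol ns node)
  have hg : N.getD node PySem.Dict.empty
      = PySem.Dict.empty.update (ol.flatMap (fun ov => bGetNode ov ns node)) := by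
    rw [hN, N_getD, hQS, dist_node ol hpre ns node]
  rw [hg, attrs_items_eq ol hpre ns node]

-- ===== VERDICT (by name: the statement is the Claim_ definition above) =====
theorem merge_overviews_spec : Claim_equal_merge_overviews := by
  intro ol _ hpre
  show ((ol.foldl (fun m ov => ov.foldl aNsStep m) PySem.Dict.empty).items.map
      (fun p => (p.1, p.2.items.map (fun q => (q.1, q.2.items))))) = merge_overviews_alt ol
  rw [a_fold_eq ol PySem.Dict.empty PySem.Dict.nodup_keys_empty]
  set M := (ol.flatMap id).foldl mNsStep PySem.Dict.empty with hM
  have hnd : M.keys.Nodup := by rw [hM, M_keys]; exact PySem.Set.nodup_ofList _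
  rw [PySem.Dict.items_eq_map_keys M hnd PySem.Dict.empty, List.map_map]
  unfold merge_overviews_alt
  have hk : M.keys = PySem.List.dedup (ol.flatMap (fun ov => ov.map (fun p => p.1))) := by
    rw [hM, M_keys, List.map_flatMap]; rfl
  rw [hk]
  apply List.map_congr_left
  intro ns _
  show (ns, (M.getD ns PySem.Dict.empty).items.map (fun q => (q.1, q.2.items)))
      = (ns, bNsNodes ol ns)
  have hg : M.getD ns PySem.Dict.empty
      = (ol.flatMap (fun ov => bGetNs ov ns)).foldl mNodeStep PySem.Dict.empty := by
    rw [hM, M_getD, dist_ns ol hpre ns]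
  rw [hg, nodes_items_eq ol hpre ns]
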